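-- pv_equiv track=rewrite | github.com/kenz-gelsoft/haiku-kits-rs | gen_binding.py | generated_rs
-- ===== SOURCE A (Python) =====
-- def generated_rs(initials):
--     yield '''\
-- #![allow(non_upper_case_globals)]
-- #![allow(unused_imports)]
--
-- use std::os::raw::{c_double, c_int, c_long, c_uchar, c_uint, c_void};
--
-- use super::*;
-- use methods::*;
-- '''
--     yield 'mod ffi;'
--     for i in initials:
--         yield 'mod ffi_%s;' % (i,)
--     yield ''
--     yield 'pub mod methods;'
--     for i in initials:
--         yield 'mod methods_%s;' % (i,)
--     yield ''
--     yield 'pub mod class;'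
--     for i in initials:
--         yield 'mod class_%s;' % (i,)
-- ===== SOURCE B (Python) =====
-- def generated_rs(initials):
--     # Single pass over initials: build all three per-initial module lists at once,
--     # then emit header + sections. (A iterates initials three times.)
--     ffi_mods, methods_mods, class_mods = [], [], []
--     for i in initials:
--         ffi_mods.append('mod ffi_%s;' % (i,))
--         methods_mods.append('mod methods_%s;' % (i,))
--         class_mods.append('mod class_%s;' % (i,))
--     yield '''\
-- #![allow(non_upper_case_globals)]
-- #![allow(unused_imports)]
--
-- use std::os::raw::{c_double, c_int, c_long, c_uchar, c_uint, c_void};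
--
-- use super::*;
-- use methods::*;
-- '''
--     yield 'mod ffi;'
--     yield from ffi_mods
--     yield ''
--     yield 'pub mod methods;'
--     yield from methods_mods
--     yield ''
--     yield 'pub mod class;'
--     yield from class_mods
-- ===== Notes on version B (the rewrite author's own statement) =====
-- stated objective: alternative
-- what changed: B traverses initials exactly once, accumulating the three per-initial module lists (ffi/methods/class) simultaneously in a single loop, then splices them between the fixed section headers, instead of A's three separate per-section passes over initials.
import Mathlib
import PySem

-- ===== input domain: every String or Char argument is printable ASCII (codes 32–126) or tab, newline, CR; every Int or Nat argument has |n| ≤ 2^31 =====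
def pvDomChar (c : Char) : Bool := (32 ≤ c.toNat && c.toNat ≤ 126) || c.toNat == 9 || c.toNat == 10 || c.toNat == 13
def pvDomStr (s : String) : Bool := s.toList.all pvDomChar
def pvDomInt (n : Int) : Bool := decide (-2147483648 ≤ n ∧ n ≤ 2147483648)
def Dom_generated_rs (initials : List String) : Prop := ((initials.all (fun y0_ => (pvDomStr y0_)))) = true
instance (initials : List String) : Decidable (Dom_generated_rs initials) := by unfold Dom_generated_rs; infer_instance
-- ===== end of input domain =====

-- B traverses initials once, building the three per-initial module lists in a single loop,
-- instead of A's three separate per-section passes; both Pythons are generators, ported as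
-- the list of yielded strings (equal yielded sequences for list inputs).

-- ===== PORT A =====
def pvHeader : String := "#![allow(non_upper_case_globals)]\n#![allow(unused_imports)]\n\nuse std::os::raw::{c_double, c_int, c_long, c_uchar, c_uint, c_void};\n\nuse super::*;\nuse methods::*;\n"

def generated_rs (initials : List String) : List String :=
  [pvHeader, "mod ffi;"]
  ++ initials.map (fun i => "mod ffi_" ++ i ++ ";")
  ++ ["", "pub mod methods;"]
  ++ initials.map (fun i => "mod methods_" ++ i ++ ";")
  ++ ["", "pub mod class;"]
  ++ initials.map (fun i => "mod class_" ++ i ++ ";")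

-- ===== PORT B =====
def generated_rs_alt (initials : List String) : List String :=
  let acc :=
    initials.foldl
      (fun (acc : List String × List String × List String) i =>
        (acc.1 ++ ["mod ffi_" ++ i ++ ";"],
         acc.2.1 ++ ["mod methods_" ++ i ++ ";"],
         acc.2.2 ++ ["mod class_" ++ i ++ ";"]))
      ([], [], [])
  [pvHeader, "mod ffi;"] ++ acc.1
  ++ ["", "pub mod methods;"] ++ acc.2.1
  ++ ["", "pub mod class;"] ++ acc.2.2

-- ===== PRECONDITION & SPEC =====
def Spec_generated_rs (initials : List String) (out : List String) : Prop := out = generated_rs_alt initials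
instance (initials : List String) (out : List String) : Decidable (Spec_generated_rs initials out) := by unfold Spec_generated_rs; infer_instance

-- ===== CLAIM =====
def Claim_equal_generated_rs : Prop := ∀ (initials : List String), Dom_generated_rs initials → Spec_generated_rs initials (generated_rs initials)

-- ===== LEMMAS AND PROOFS =====
theorem pv_fold_triple (initials a b c : List String) :
    initials.foldl
      (fun (acc : List String × List String × List String) i =>
        (acc.1 ++ ["mod ffi_" ++ i ++ ";"],
         acc.2.1 ++ ["mod methods_" ++ i ++ ";"],
         acc.2.2 ++ ["mod class_" ++ i ++ ";"]))
      (a, b, c)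
    = (a ++ initials.map (fun i => "mod ffi_" ++ i ++ ";"),
       b ++ initials.map (fun i => "mod methods_" ++ i ++ ";"),
       c ++ initials.map (fun i => "mod class_" ++ i ++ ";")) := by
  induction initials generalizing a b c with
  | nil => simp
  | cons x xs ih => simp [List.foldl, ih]

-- ===== VERDICT =====
theorem generated_rs_spec : Claim_equal_generated_rs := by
  intro initials _
  show generated_rs initials = generated_rs_alt initials
  simp [generated_rs, generated_rs_alt, pv_fold_triple]
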